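-- pv_equiv track=rewrite | github.com/elpablo92/PracticesPY | hackerranck.com/COUNT_VALLEYS.PY | Count_valleys
-- ===== SOURCE A (Python) =====
-- def Count_valleys(s):
--     """D D U U    D D U D U U   U D = 2 ---UD D DU DU U = 1"""
--     s1 = list(s)
--     lvl = 0
--     v = 0
--     for c in s1:
--         if c == 'U':
--             lvl +=1
--         elif c == 'D':
--             lvl -=1
--
--         if lvl == 0 and c =='U':
--             v+=1
--
--     return v
-- ===== SOURCE B (Python) =====
-- def Count_valleys(s):
--     # Build the full cumulative-elevation table first, then scan consecutive
--     # level pairs for valley exits (prev < 0 and cur == 0).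
--     levels = [0]
--     for c in s:
--         levels.append(levels[-1] + (1 if c == 'U' else -1 if c == 'D' else 0))
--     return sum(1 for p, q in zip(levels, levels[1:]) if p < 0 and q == 0)
-- ===== Notes on version B (the rewrite author's own statement) =====
-- stated objective: alternative
-- what changed: Replaces A's fused loop (inline level update plus inline counting) by a two-pass decomposition: first build the cumulative-elevation table, then count transitions where the previous level is negative and the current level is zero.
import Mathlib
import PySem

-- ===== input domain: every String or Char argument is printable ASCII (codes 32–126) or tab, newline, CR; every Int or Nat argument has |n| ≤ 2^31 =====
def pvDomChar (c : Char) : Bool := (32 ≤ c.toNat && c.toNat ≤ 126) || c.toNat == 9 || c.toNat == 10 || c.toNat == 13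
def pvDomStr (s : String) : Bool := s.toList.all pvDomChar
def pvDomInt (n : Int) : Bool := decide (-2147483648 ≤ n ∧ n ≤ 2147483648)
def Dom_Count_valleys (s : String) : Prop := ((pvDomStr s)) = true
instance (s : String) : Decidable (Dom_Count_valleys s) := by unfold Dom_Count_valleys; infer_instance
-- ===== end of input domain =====

-- B replaces A's fused loop by a build-the-level-table-then-scan-transitions decomposition (alternative, same cost).


-- ===== PORT A =====
def Count_valleys (s : String) : Int :=
  let s1 := s.toList
  let r := s1.foldl (fun (st : Int × Int) c =>
    let lvl := if c = 'U' then st.1 + 1 else if c = 'D' then st.1 - 1 else st.1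
    let v := if lvl = 0 ∧ c = 'U' then st.2 + 1 else st.2
    (lvl, v)) (0, 0)
  r.2

-- ===== PORT B =====
-- cumulative elevation table (levels after each step, starting level passed in)
def cvLevels : List Char → Int → List Int
  | [], _ => []
  | c :: cs, lvl =>
    let lvl' := lvl + (if c = 'U' then 1 else if c = 'D' then -1 else 0)
    lvl' :: cvLevels cs lvl'

def Count_valleys_alt (s : String) : Int :=
  let levels := 0 :: cvLevels s.toList 0
  (((levels.zip levels.tail).filter (fun p => decide (p.1 < 0 ∧ p.2 = 0))).length : Int)

-- ===== PRECONDITION & SPEC =====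
def Spec_Count_valleys (s : String) (out : Int) : Prop := out = Count_valleys_alt s
instance (s : String) (out : Int) : Decidable (Spec_Count_valleys s out) := by unfold Spec_Count_valleys; infer_instance

-- ===== CLAIM (what is proved, stated in full; the proofs are below) =====
def Claim_equal_Count_valleys : Prop := ∀ (s : String), Dom_Count_valleys s → Spec_Count_valleys s (Count_valleys s)

-- ===== LEMMAS AND PROOFS =====
def cvStep (st : Int × Int) (c : Char) : Int × Int :=
  let lvl := if c = 'U' then st.1 + 1 else if c = 'D' then st.1 - 1 else st.1
  let v := if lvl = 0 ∧ c = 'U' then st.2 + 1 else st.2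
  (lvl, v)

def cvCount (cs : List Char) (lvl : Int) : Nat :=
  (((lvl :: cvLevels cs lvl).zip (cvLevels cs lvl)).filter (fun p => decide (p.1 < 0 ∧ p.2 = 0))).length

lemma cv_main : ∀ (cs : List Char) (lvl v : Int),
    (cs.foldl cvStep (lvl, v)).2 = v + (cvCount cs lvl : Int) := by
  intro cs
  induction cs with
  | nil => intro lvl v; simp [cvCount, cvLevels]
  | cons c cs ih =>
    intro lvl v
    simp only [List.foldl_cons]
    rw [show cvStep (lvl, v) c =
      ((if c = 'U' then lvl + 1 else if c = 'D' then lvl - 1 else lvl),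
       (if (if c = 'U' then lvl + 1 else if c = 'D' then lvl - 1 else lvl) = 0 ∧ c = 'U'
        then v + 1 else v)) from rfl]
    rw [ih]
    have hc : cvCount (c :: cs) lvl =
        (if lvl < 0 ∧ (lvl + (if c = 'U' then 1 else if c = 'D' then -1 else 0)) = 0 then 1 else 0)
          + cvCount cs (lvl + (if c = 'U' then 1 else if c = 'D' then -1 else 0)) := by
      simp only [cvCount, cvLevels, List.zip_cons_cons, List.filter_cons]
      by_cases hlt : lvl < 0 ∧ (lvl + (if c = 'U' then 1 else if c = 'D' then -1 else 0)) = 0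
      · simp [hlt]; omega
      · simp [hlt]
    rw [hc]
    by_cases hU : c = 'U' <;> by_cases hD : c = 'D' <;>
      simp [hU, hD, sub_eq_add_neg] <;> first | (split_ifs <;> omega) | omega

-- ===== VERDICT (by name: the statement is the Claim_ definition above) =====
theorem Count_valleys_spec : Claim_equal_Count_valleys := by
  intro s _
  show Count_valleys s = Count_valleys_alt s
  show (s.toList.foldl cvStep (0, 0)).2 = _
  rw [cv_main]
  simp [Count_valleys_alt, cvCount]
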